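-- pv_equiv track=rewrite | github.com/colsonenderby/greasycumsock | image_selector.py | determine_dominant_category
-- ===== SOURCE A (Python) =====
-- CATEGORY_HIERARCHY = [
--     "Sexual & Explicit Content",
--     "Relationship Dynamics",
--     "Emotions",
--     "Interaction Styles",
--     "Intentions & Behaviors",
--     "Topics & Activities",
--     "Values & Ethics",
--     "Miscellaneous"
-- ]
--
-- def determine_dominant_category(category_scores):
--     """
--     Determines the dominant category based on cumulative scores and predefined hierarchy.
--
--     Args:
--         category_scores (dict): Dictionary with primary categories as keys and their cumulative scores as values.
--
--     Returns:
--         str: The dominant primary category.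
--     """
--     # Find the maximum score
--     max_score = max(category_scores.values())
--     # Find all categories that have the maximum score
--     top_categories = [cat for cat, score in category_scores.items() if score == max_score]
--
--     if len(top_categories) == 1:
--         return top_categories[0]
--     else:
--         # Tie-breaking based on hierarchy
--         for category in CATEGORY_HIERARCHY:
--             if category in top_categories:
--                 return category
--     return "Miscellaneous"  # Fallback
-- ===== SOURCE B (Python) =====
-- CATEGORY_HIERARCHY = [
--     "Sexual & Explicit Content",
--     "Relationship Dynamics",
--     "Emotions",
--     "Interaction Styles",
--     "Intentions & Behaviors",
--     "Topics & Activities",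
--     "Values & Ethics",
--     "Miscellaneous"
-- ]
--
--
-- def determine_dominant_category(category_scores):
--     """Single-pass running-argmax: one loop over the items maintaining the current
--     max score, the number of categories holding it, the lowest hierarchy rank
--     among them and the first of them; no top-category list is ever built."""
--     rank_of = {c: i for i, c in enumerate(CATEGORY_HIERARCHY)}
--     n = len(CATEGORY_HIERARCHY)
--     best_score = None
--     top_count = 0
--     best_rank = n
--     first_top = None
--     for cat, score in category_scores.items():
--         if best_score is None or score > best_score:
--             best_score = score
--             top_count = 1
--             best_rank = rank_of.get(cat, n)
--             first_top = cat
--         elif score == best_score: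
--             top_count += 1
--             best_rank = min(best_rank, rank_of.get(cat, n))
--     if top_count == 0:
--         return "Miscellaneous"
--     if top_count == 1:
--         return first_top
--     if best_rank < n:
--         return CATEGORY_HIERARCHY[best_rank]
--     return "Miscellaneous"
-- ===== Notes on version B (the rewrite author's own statement) =====
-- stated objective: alternative
-- what changed: B replaces A's staged passes (find max, build the full top-category list, branch on its length, then scan the hierarchy for membership) by a single running-argmax fold over the items that maintains the current max score, the count of categories holding it, the minimum hierarchy rank among them and the first of them, then reads the answer off that accumulator; no top-category list is ever built.
import Mathlib
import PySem

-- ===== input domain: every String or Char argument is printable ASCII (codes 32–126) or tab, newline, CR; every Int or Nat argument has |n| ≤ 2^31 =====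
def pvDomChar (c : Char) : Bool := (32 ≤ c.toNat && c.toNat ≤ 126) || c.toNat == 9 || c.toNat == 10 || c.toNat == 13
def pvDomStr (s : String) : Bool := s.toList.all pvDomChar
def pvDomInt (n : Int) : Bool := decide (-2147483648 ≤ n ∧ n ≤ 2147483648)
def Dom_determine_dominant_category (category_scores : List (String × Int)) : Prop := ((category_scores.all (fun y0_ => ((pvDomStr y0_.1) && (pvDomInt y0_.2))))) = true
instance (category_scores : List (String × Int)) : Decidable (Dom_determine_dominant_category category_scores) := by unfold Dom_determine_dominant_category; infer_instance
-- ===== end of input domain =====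

-- B replaces A's ties-first structure (build the top-category list, branch on its length, then scan
-- the hierarchy) by a single running-argmax fold over the items that maintains the current maximum,
-- how many categories hold it, the lowest hierarchy rank among them and the first of them; no
-- top-category list is built: a different decomposition, same cost.


def CATEGORY_HIERARCHY : List String :=
  ["Sexual & Explicit Content", "Relationship Dynamics", "Emotions", "Interaction Styles",
   "Intentions & Behaviors", "Topics & Activities", "Values & Ethics", "Miscellaneous"]

-- ===== PORT A =====
-- The dict argument arrives as an association list; Dict.ofList applies Python's
-- duplicate-key overwrite (last value wins, first position kept), exact for dict(...).
def determine_dominant_category (category_scores : List (String × Int)) : String :=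
  let d := PySem.Dict.ofList category_scores
  match PySem.List.max? d.values (fun v => v) with
  | none => ""  -- unreachable: Pre_ excludes the empty dict (Python max() raises ValueError)
  | some max_score =>
    let top_categories := (d.items.filter (fun p => p.2 == max_score)).map (fun p => p.1)
    if top_categories.length == 1 then
      top_categories.headD ""
    else
      match CATEGORY_HIERARCHY.find? (fun category => top_categories.contains category) with
      | some category => category
      | none => "Miscellaneous"

-- ===== PORT B =====
-- rank_of = {c: i for i, c in enumerate(CATEGORY_HIERARCHY)}
def altRank : PySem.Dict String Int :=
  PySem.Dict.ofList ((PySem.List.enumerate CATEGORY_HIERARCHY).map (fun p => (p.2, p.1)))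

-- n = len(CATEGORY_HIERARCHY)
def altN : Int := (CATEGORY_HIERARCHY.length : Int)

-- the loop body: state = (best_score, top_count, best_rank, first_top)
def altStep (st : Option Int × Int × Int × Option String) (p : String × Int) :
    Option Int × Int × Int × Option String :=
  match st with
  | (none, _, _, _) => (some p.2, 1, altRank.getD p.1 altN, some p.1)
  | (some b, tc, br, ft) =>
    if p.2 > b then (some p.2, 1, altRank.getD p.1 altN, some p.1)
    else if p.2 == b then (some b, tc + 1, min br (altRank.getD p.1 altN), ft)
    else (some b, tc, br, ft)

def determine_dominant_category_alt (category_scores : List (String × Int)) : String :=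
  let d := PySem.Dict.ofList category_scores
  let st := d.items.foldl altStep (none, 0, altN, none)
  if st.2.1 == 0 then "Miscellaneous"
  else if st.2.1 == 1 then st.2.2.2.getD ""     -- first_top is set whenever top_count ≥ 1
  else if st.2.2.1 < altN then (PySem.List.pyGet? CATEGORY_HIERARCHY st.2.2.1).getD ""  -- 0 ≤ best_rank < n: in range
  else "Miscellaneous"

-- ===== PRECONDITION & SPEC =====
-- Pre_ excludes only the empty dict, on which Python's max() raises ValueError.
def Pre_determine_dominant_category (category_scores : List (String × Int)) : Prop :=
  category_scores ≠ []
instance (category_scores : List (String × Int)) : Decidable (Pre_determine_dominant_category category_scores) := by unfold Pre_determine_dominant_category; infer_instance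
def pvWitness_determine_dominant_category : (List (String × Int)) := [("Emotions", 3), ("x", 1)]
def Spec_determine_dominant_category (category_scores : List (String × Int)) (out : String) : Prop := out = determine_dominant_category_alt category_scores
instance (category_scores : List (String × Int)) (out : String) : Decidable (Spec_determine_dominant_category category_scores out) := by unfold Spec_determine_dominant_category; infer_instance

-- ===== CLAIM (what is proved, stated in full; the proofs are below) =====
def Claim_equal_determine_dominant_category : Prop := ∀ (category_scores : List (String × Int)), Dom_determine_dominant_category category_scores → Pre_determine_dominant_category category_scores → Spec_determine_dominant_category category_scores (determine_dominant_category category_scores)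
-- ===== LEMMAS AND PROOFS =====

-- rank of a category: its hierarchy index, 8 (= altN) if absent
def rnk (c : String) : Int := altRank.getD c altN

-- the top-category list of a value m in an item list
def topOf (m : Int) (L : List (String × Int)) : List String :=
  (L.filter (fun q => q.2 == m)).map Prod.fst

-- characterisation of B's fold state over the nonempty item prefix p :: rest
def stats (p : String × Int) (rest : List (String × Int)) :
    Option Int × Int × Int × Option String :=
  let M := (rest.map Prod.snd).foldl max p.2
  let top := topOf M (p :: rest)
  (some M, (top.length : Int), (top.map rnk).foldl min altN, top.head?)


lemma altRank_eq : altRank = PySem.Dict.mk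
    [("Sexual & Explicit Content",0),("Relationship Dynamics",1),("Emotions",2),("Interaction Styles",3),
     ("Intentions & Behaviors",4),("Topics & Activities",5),("Values & Ethics",6),("Miscellaneous",7)] := by
  rfl

set_option maxHeartbeats 1000000 in
lemma rnk_eq (c : String) : rnk c =
    if "Sexual & Explicit Content" == c then 0 else if "Relationship Dynamics" == c then 1
    else if "Emotions" == c then 2 else if "Interaction Styles" == c then 3
    else if "Intentions & Behaviors" == c then 4 else if "Topics & Activities" == c then 5
    else if "Values & Ethics" == c then 6 else if "Miscellaneous" == c then 7 else 8 := by
  rw [rnk, altRank_eq, PySem.Dict.getD_eq_get?_getD]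
  simp only [PySem.Dict.get?_mk_cons]
  split_ifs <;> rfl

lemma rnk_nonneg (c : String) : 0 ≤ rnk c := by
  rw [rnk_eq]; split_ifs <;> norm_num

lemma rnk_le (c : String) : rnk c ≤ 8 := by
  rw [rnk_eq]; split_ifs <;> norm_num

-- a rank below 8 names the hierarchy entry at that index
lemma rnk_lt_eq {c : String} (h : rnk c < 8) :
    CATEGORY_HIERARCHY.getD (rnk c).toNat "" = c := by
  rw [rnk_eq] at h ⊢
  split_ifs at h ⊢ with h1 h2 h3 h4 h5 h6 h7 h8 <;>
    simp_all [CATEGORY_HIERARCHY, beq_iff_eq]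

-- the rank of the hierarchy entry at index j is j
lemma rnk_getElem (j : Nat) (hj : j < 8) :
    rnk (CATEGORY_HIERARCHY.getD j "") = (j : Int) := by
  interval_cases j <;> rfl

lemma foldl_min_le_init (l : List Int) (a : Int) : l.foldl min a ≤ a := by
  induction l generalizing a with
  | nil => simp
  | cons x t ih => exact le_trans (ih (min a x)) (min_le_left a x)

lemma foldl_min_le_mem (l : List Int) (a : Int) (x : Int) (hx : x ∈ l) : l.foldl min a ≤ x := by
  induction l generalizing a with
  | nil => simp at hx
  | cons y t ih =>
    rcases List.mem_cons.mp hx with rfl | hx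
    · exact le_trans (foldl_min_le_init t (min a x)) (min_le_right a x)
    · exact ih (min a y) hx

lemma foldl_min_mem_or_init (l : List Int) (a : Int) : l.foldl min a = a ∨ l.foldl min a ∈ l := by
  induction l generalizing a with
  | nil => simp
  | cons x t ih =>
    rcases ih (min a x) with h | h
    · rcases min_choice a x with hm | hm
      · exact Or.inl (by rw [List.foldl_cons, h, hm])
      · exact Or.inr (by rw [List.foldl_cons, h, hm]; exact List.mem_cons_self)
    · exact Or.inr (List.mem_cons_of_mem x h)

-- the maximum is attained, so the top list is never empty
lemma topOf_ne_nil (p : String × Int) (rest : List (String × Int)) :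
    topOf ((rest.map Prod.snd).foldl max p.2) (p :: rest) ≠ [] := by
  have hmem : (rest.map Prod.snd).foldl max p.2 ∈ (p :: rest).map Prod.snd := by
    apply PySem.List.max?_mem (key := fun y : Int => y)
    rw [List.map_cons, PySem.List.max?_id_cons]
  rcases List.mem_map.mp hmem with ⟨r, hr, hr2⟩
  intro hnil
  have hfil := List.filter_eq_nil_iff.mp (List.map_eq_nil_iff.mp hnil)
  exact hfil r hr (by simp [hr2])

lemma mem_hierarchy_rnk {c : String} (hc : c ∈ CATEGORY_HIERARCHY) : rnk c ≤ 7 := by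
  fin_cases hc <;> decide

lemma step_stats (p : String × Int) (rest : List (String × Int)) (q : String × Int) :
    altStep (stats p rest) q = stats p (rest ++ [q]) := by
  have haN : altN = 8 := rfl
  simp only [stats]
  set M := (rest.map Prod.snd).foldl max p.2 with hM
  have hM' : ((rest ++ [q]).map Prod.snd).foldl max p.2 = max M q.2 := by
    rw [List.map_append, List.foldl_append]; rfl
  have hub : ∀ r ∈ p :: rest, r.2 ≤ M := by
    intro r hr
    rcases List.mem_cons.mp hr with h | h
    · rw [h]; exact (PySem.List.le_foldl_max (rest.map Prod.snd) p.2).1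
    · exact (PySem.List.le_foldl_max (rest.map Prod.snd) p.2).2 r.2
        (List.mem_map.mpr ⟨r, h, rfl⟩)
  have hcons : (p :: (rest ++ [q]) : List (String × Int)) = (p :: rest) ++ [q] := rfl
  rcases lt_trichotomy M q.2 with hgt | heq | hlt
  · -- new maximum
    have h1 : max M q.2 = q.2 := max_eq_right (le_of_lt hgt)
    have h3 : topOf q.2 (p :: (rest ++ [q])) = [q.1] := by
      rw [hcons, topOf, List.filter_append]
      have hf : (p :: rest).filter (fun r => r.2 == q.2) = [] := by
        rw [List.filter_eq_nil_iff]
        intro r hr hbad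
        exact absurd (by simpa using hbad)
          (ne_of_lt (lt_of_le_of_lt (hub r hr) hgt))
      simp [hf]
    simp only [altStep]
    rw [if_pos (show q.2 > M from hgt), hM', h1, h3]
    have hle : altRank.getD q.1 altN ≤ altN := by rw [haN]; exact rnk_le q.1
    simp [rnk, min_eq_right hle]
  · -- ties the maximum
    have h1 : max M q.2 = M := by omega
    have h2 : topOf M (p :: (rest ++ [q])) = topOf M (p :: rest) ++ [q.1] := by
      rw [hcons, topOf, topOf, List.filter_append, List.map_append]
      simp [heq]
    simp only [altStep]
    rw [if_neg (show ¬ q.2 > M by omega), if_pos (show (q.2 == M) = true by simp [heq]), hM', h1, h2]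
    refine congrArg _ (Prod.ext ?_ (Prod.ext ?_ ?_))
    · simp
    · simp [List.map_append, List.foldl_append, rnk]
    · cases htop : topOf M (p :: rest) with
      | nil => exact absurd htop (topOf_ne_nil p rest)
      | cons a t => simp
  · -- below the maximum: state unchanged
    have h1 : max M q.2 = M := by omega
    have h2 : topOf M (p :: (rest ++ [q])) = topOf M (p :: rest) := by
      rw [hcons, topOf, topOf, List.filter_append]
      have hf : [q].filter (fun r => r.2 == M) = [] := by simp; omega
      simp [hf]
    simp only [altStep]
    rw [if_neg (show ¬ q.2 > M by omega), if_neg (show ¬ (q.2 == M) = true by simp; omega),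
      hM', h1, h2]

lemma fold_stats (ys : List (String × Int)) (p : String × Int) (rest : List (String × Int)) :
    ys.foldl altStep (stats p rest) = stats p (rest ++ ys) := by
  induction ys generalizing rest with
  | nil => simp
  | cons q ys ih => rw [List.foldl_cons, step_stats, ih]; simp

lemma hier_find (top : List String) :
    CATEGORY_HIERARCHY.find? (fun c => top.contains c) =
      if (top.map rnk).foldl min altN < altN then
        some ((PySem.List.pyGet? CATEGORY_HIERARCHY ((top.map rnk).foldl min altN)).getD "")
      else none := by
  have haN : altN = 8 := rfl
  set m := (top.map rnk).foldl min altN with hm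
  have hub : ∀ c ∈ top, m ≤ rnk c := fun c hc =>
    foldl_min_le_mem _ _ _ (List.mem_map.mpr ⟨c, hc, rfl⟩)
  have hm8 : m ≤ 8 := haN ▸ foldl_min_le_init _ _
  by_cases hlt : m < altN
  · rw [if_pos hlt]
    rw [haN] at hlt
    have hmem : m ∈ top.map rnk := by
      rcases foldl_min_mem_or_init (top.map rnk) altN with h | h
      · exfalso; rw [← hm, haN] at h; omega
      · exact h
    rcases List.mem_map.mp hmem with ⟨c, hc, hrc⟩
    have h0 : 0 ≤ m := hrc ▸ rnk_nonneg c
    have hchar : CATEGORY_HIERARCHY.getD m.toNat "" = c := by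
      rw [← hrc] at hlt ⊢; exact rnk_lt_eq hlt
    have hlen : m.toNat < CATEGORY_HIERARCHY.length := by
      simp [CATEGORY_HIERARCHY]; omega
    have hget : (PySem.List.pyGet? CATEGORY_HIERARCHY m).getD "" = CATEGORY_HIERARCHY.getD m.toNat "" := by
      rw [show ((PySem.List.pyGet? CATEGORY_HIERARCHY m).getD "") =
          PySem.List.pyGetD CATEGORY_HIERARCHY m "" from rfl,
        PySem.List.pyGetD_of_nonneg _ _ h0]
    rw [hget]
    have hchar' : (CATEGORY_HIERARCHY[m.toNat]?).getD "" = c := by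
      rw [← List.getD_eq_getElem?_getD]; exact hchar
    rw [List.find?_eq_some_iff_getElem]
    refine ⟨by simpa [hchar'] using hc, m.toNat, hlen, ?_, ?_⟩
    · exact (List.getD_eq_getElem _ "" hlen).symm
    · intro j hj
      simp only [Bool.not_eq_eq_eq_not, Bool.not_true, List.contains_eq_mem, decide_eq_false_iff_not]
      intro hmem'
      have hj8 : j < 8 := by omega
      have := hub _ hmem'
      rw [show CATEGORY_HIERARCHY[j] = CATEGORY_HIERARCHY.getD j "" from
        (List.getD_eq_getElem _ _ (by simp [CATEGORY_HIERARCHY]; omega)).symm,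
        rnk_getElem j hj8] at this
      omega
  · rw [if_neg hlt]
    rw [List.find?_eq_none]
    intro x hx hpred
    have h7 : rnk x ≤ 7 := mem_hierarchy_rnk hx
    have hxtop : x ∈ top := by simpa using hpred
    have := hub x hxtop
    rw [haN] at hlt
    omega

lemma items_update_ne_nil (cs : List (String × Int)) (d : PySem.Dict String Int)
    (h : d.items ≠ []) : (d.update cs).items ≠ [] := by
  induction cs generalizing d with
  | nil => exact h
  | cons p rest ih =>
    have hstep : (d.update (p :: rest)) = (d.insert p.1 p.2).update rest := rfl
    rw [hstep]
    refine ih _ ?_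
    rw [PySem.Dict.items_insert]
    split
    · simpa using h
    · simp

lemma items_ofList_ne_nil (cs : List (String × Int)) (h : cs ≠ []) :
    (PySem.Dict.ofList cs).items ≠ [] := by
  obtain ⟨p, rest, rfl⟩ := List.exists_cons_of_ne_nil h
  have hstep : PySem.Dict.ofList (p :: rest) = (PySem.Dict.empty.insert p.1 p.2).update rest := rfl
  rw [hstep]
  refine items_update_ne_nil _ _ ?_
  rw [PySem.Dict.items_insert]
  split
  · simp_all [PySem.Dict.contains_empty]
  · simp

lemma ports_agree (cs : List (String × Int)) (h : cs ≠ []) :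
    determine_dominant_category cs = determine_dominant_category_alt cs := by
  obtain ⟨p, rest, hitems⟩ := List.exists_cons_of_ne_nil (items_ofList_ne_nil cs h)
  simp only [determine_dominant_category, determine_dominant_category_alt]
  have hvals : (PySem.Dict.ofList cs).values = p.2 :: rest.map Prod.snd := by
    simp only [PySem.Dict.values, hitems, List.map_cons]
  rw [hvals, PySem.List.max?_id_cons, hitems]
  dsimp only
  have hinit : altStep (none, 0, altN, none) p = stats p [] := by
    have hle : altRank.getD p.1 altN ≤ altN := by
      rw [show altN = (8 : Int) from rfl]; exact rnk_le p.1
    simp [altStep, stats, topOf, rnk, min_eq_right hle]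
  rw [List.foldl_cons, hinit, fold_stats rest p [], List.nil_append]
  set M := (rest.map Prod.snd).foldl max p.2 with hM
  set top := topOf M (p :: rest) with htopdef
  have htopA : ((p :: rest).filter (fun q => q.2 == M)).map (fun q => q.1) = top := rfl
  rw [htopA]
  have hne := topOf_ne_nil p rest
  rw [← htopdef] at hne
  simp only [stats, ← hM, ← htopdef]
  have hne' : top.length ≠ 0 := fun hc => hne (List.length_eq_zero_iff.mp hc)
  by_cases h1 : top.length = 1
  · rw [if_pos (show (top.length == 1) = true by simp [h1]),
        if_neg (show ¬ ((top.length : Int) == 0) = true by simp [h1]),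
        if_pos (show ((top.length : Int) == 1) = true by simp [h1])]
    obtain ⟨a, t, htop⟩ := List.exists_cons_of_ne_nil hne
    rw [htop]; simp
  · rw [if_neg (show ¬ (top.length == 1) = true by simp [h1]),
        if_neg (show ¬ ((top.length : Int) == 0) = true by simp [hne']),
        if_neg (show ¬ ((top.length : Int) == 1) = true by simp [h1]),
        hier_find top]
    by_cases hlt : (top.map rnk).foldl min altN < altN
    · rw [if_pos hlt]; rw [if_pos hlt]
    · rw [if_neg hlt]; rw [if_neg hlt]

-- ===== VERDICT (by name: the statement is the Claim_ definition above) =====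
theorem determine_dominant_category_spec : Claim_equal_determine_dominant_category := by
  intro cs _ hpre
  exact ports_agree cs hpre
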